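-- pv_equiv track=rewrite | github.com/D-Programming-Man/Pseudo | interlib/append.py | syntax_parse
-- ===== SOURCE A (Python) =====
-- def syntax_parse(append_line):
--   new_statement = ["", "", ""]
--   counter = 2
--   for x in range(len(append_line)-1, -1, -1):
--     if x == len(append_line)-2 or x == len(append_line)-1:
--       new_statement[counter] = append_line[x]
--       counter = counter - 1
--     else:
--       if x != 0:
--         new_statement[0] = append_line[x]  + new_statement[0]
--       else:
--         new_statement[0] = append_line[x] + " " + new_statement[0]
--   return new_statement
-- ===== SOURCE B (Python) =====
-- def syntax_parse(append_line):
--     n = len(append_line)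
--     return [
--         append_line[0] + " " + "".join(append_line[1:n - 2]) if n >= 3 else "",
--         append_line[n - 2] if n >= 2 else "",
--         append_line[n - 1] if n >= 1 else "",
--     ]
-- ===== Notes on version B (the rewrite author's own statement) =====
-- stated objective: faster
-- what changed: Replaces A's reverse loop over a mutable 3-slot list with a counter (which builds slot 0 by repeated string prepending) by computing each slot directly from the length: the last two elements by index and slot 0 as head + ' ' + a single ''.join of the middle elements.
import Mathlib
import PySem

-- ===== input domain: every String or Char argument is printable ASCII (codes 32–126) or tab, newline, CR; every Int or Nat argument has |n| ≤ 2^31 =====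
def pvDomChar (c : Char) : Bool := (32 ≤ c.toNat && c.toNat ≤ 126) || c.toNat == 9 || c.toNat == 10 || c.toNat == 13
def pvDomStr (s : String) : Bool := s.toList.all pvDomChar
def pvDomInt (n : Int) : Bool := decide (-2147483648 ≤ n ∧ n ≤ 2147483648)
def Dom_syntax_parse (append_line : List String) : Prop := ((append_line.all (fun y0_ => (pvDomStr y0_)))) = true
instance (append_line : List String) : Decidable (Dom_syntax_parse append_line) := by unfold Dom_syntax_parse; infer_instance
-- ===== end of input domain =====

-- B replaces A's reverse loop over a mutable 3-slot list and counter by computing each slot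
-- directly from the length (last two elements by index; head + one join of the middle for slot 0),
-- replacing A's repeated string prepending by a single join (measured faster).

-- ===== PORT A =====
-- loop body of A's for-loop (state: the 3-slot list and the counter)
def pvStepA (append_line : List String) (st : List String × Int) (x : Int) : List String × Int :=
  if x = (append_line.length : Int) - 2 ∨ x = (append_line.length : Int) - 1 then
    (PySem.List.pySetD st.1 st.2 (PySem.List.pyGetD append_line x ""), st.2 - 1)
  else
    if x ≠ 0 then
      (PySem.List.pySetD st.1 0 (PySem.List.pyGetD append_line x "" ++ PySem.List.pyGetD st.1 0 ""), st.2)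
    else
      (PySem.List.pySetD st.1 0 (PySem.List.pyGetD append_line x "" ++ " " ++ PySem.List.pyGetD st.1 0 ""), st.2)

def syntax_parse (append_line : List String) : List String :=
  ((PySem.List.pyRange ((append_line.length : Int) - 1) (-1) (-1)).foldl
    (pvStepA append_line) (["", "", ""], 2)).1

-- ===== PORT B =====
def syntax_parse_alt (append_line : List String) : List String :=
  let n : Int := append_line.length
  [ if n ≥ 3 then
      PySem.List.pyGetD append_line 0 "" ++ " " ++
        PySem.Str.join "" (PySem.List.slice append_line (some 1) (some (n - 2)))
    else "",
    if n ≥ 2 then PySem.List.pyGetD append_line (n - 2) "" else "",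
    if n ≥ 1 then PySem.List.pyGetD append_line (n - 1) "" else "" ]

-- ===== PRECONDITION & SPEC =====
def Spec_syntax_parse (append_line : List String) (out : List String) : Prop := out = syntax_parse_alt append_line
instance (append_line : List String) (out : List String) : Decidable (Spec_syntax_parse append_line out) := by unfold Spec_syntax_parse; infer_instance

-- ===== CLAIM (what is proved, stated in full; the proofs are below) =====
def Claim_equal_syntax_parse : Prop := ∀ (append_line : List String), Dom_syntax_parse append_line → Spec_syntax_parse append_line (syntax_parse append_line)

-- ===== LEMMAS AND PROOFS =====

lemma pv_join_cons (s : String) (l : List String) :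
    PySem.Str.join "" (s :: l) = s ++ PySem.Str.join "" l := by
  cases l with
  | nil => simp [PySem.Str.join, PySem.Chars.join, List.intercalate]
  | cons b t => simp [PySem.Str.join, PySem.Chars.join_cons_cons]

lemma pv_join_nil : PySem.Str.join "" ([] : List String) = "" := by
  simp [PySem.Str.join]

lemma pv_join_append (l1 l2 : List String) :
    PySem.Str.join "" (l1 ++ l2) = PySem.Str.join "" l1 ++ PySem.Str.join "" l2 := by
  induction l1 with
  | nil => simp [pv_join_nil]
  | cons a t ih => simp [pv_join_cons, ih, String.append_assoc]

-- range(a, -1, -1) = range(a, 0, -1) followed by the final index 0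
lemma pv_range_split (a : Int) (ha : 0 ≤ a) :
    PySem.List.pyRange a (-1) (-1) = PySem.List.pyRange a 0 (-1) ++ [0] := by
  rw [PySem.List.pyRange_neg_one_eq_reverse, PySem.List.pyRange_neg_one_eq_reverse]
  rw [PySem.List.pyRange_one_cons (by omega)]
  simp

-- the middle phase of A's loop (indices k, k-1, …, 1) prepends append_line[1..k] onto slot 0
lemma pv_midfold (al : List String) (k : Nat) (hk : (k : Int) ≤ (al.length : Int) - 3) :
    ∀ (s0 s1 s2 : String) (c : Int),
      (PySem.List.pyRange (k : Int) 0 (-1)).foldl (pvStepA al) ([s0, s1, s2], c)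
        = ([PySem.Str.join "" ((al.drop 1).take k) ++ s0, s1, s2], c) := by
  induction k with
  | zero =>
    intro s0 s1 s2 c
    rw [PySem.List.pyRange_neg_one_eq_nil (by omega)]
    simp [pv_join_nil]
  | succ k ih =>
    intro s0 s1 s2 c
    rw [PySem.List.pyRange_neg_one_cons (by omega)]
    have e1 : ((k + 1 : Nat) : Int) - 1 = (k : Int) := by push_cast; ring
    rw [List.foldl_cons, e1]
    have hx : pvStepA al ([s0, s1, s2], c) ((k + 1 : Nat) : Int)
        = ([PySem.List.pyGetD al ((k + 1 : Nat) : Int) "" ++ s0, s1, s2], c) := by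
      unfold pvStepA
      rw [if_neg (by push_cast; omega), if_pos (by push_cast; omega)]
      simp [PySem.List.pySetD_of_nonneg, PySem.List.pyGetD_zero_cons]
    rw [hx, ih (by omega)]
    have hlen : k + 1 < al.length := by omega
    have hget : PySem.List.pyGetD al ((k + 1 : Nat) : Int) "" = al[k + 1] := by
      rw [PySem.List.pyGetD_natCast]
      exact List.getD_eq_getElem al "" hlen
    have htake : (al.drop 1).take (k + 1) = (al.drop 1).take k ++ [al[k + 1]] := by
      have hk2 : k < (al.drop 1).length := by simp; omega
      rw [List.take_add_one, List.getElem?_eq_getElem hk2]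
      simp
    rw [htake, pv_join_append, hget]
    simp [pv_join_cons, pv_join_nil, String.append_assoc]

theorem pv_main (al : List String) : syntax_parse al = syntax_parse_alt al := by
  by_cases h3 : 3 ≤ al.length
  · -- general case
    unfold syntax_parse syntax_parse_alt
    have hn : (3 : Int) ≤ (al.length : Int) := by exact_mod_cast h3
    rw [PySem.List.pyRange_neg_one_cons (by omega)]
    have e1 : (al.length : Int) - 1 - 1 = (al.length : Int) - 2 := by ring
    rw [e1, PySem.List.pyRange_neg_one_cons (by omega)]
    have e2 : (al.length : Int) - 2 - 1 = (((al.length - 3 : Nat)) : Int) := by omega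
    rw [e2, pv_range_split _ (by omega)]
    rw [List.foldl_cons, List.foldl_cons]
    have hs1 : pvStepA al (["", "", ""], 2) ((al.length : Int) - 1)
        = (["", "", PySem.List.pyGetD al ((al.length : Int) - 1) ""], 1) := by
      unfold pvStepA
      rw [if_pos (Or.inr rfl)]
      simp [PySem.List.pySetD_of_nonneg]
    have hs2 : pvStepA al (["", "", PySem.List.pyGetD al ((al.length : Int) - 1) ""], 1) ((al.length : Int) - 2)
        = (["", PySem.List.pyGetD al ((al.length : Int) - 2) "",
            PySem.List.pyGetD al ((al.length : Int) - 1) ""], 0) := by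
      unfold pvStepA
      rw [if_pos (Or.inl rfl)]
      simp [PySem.List.pySetD_of_nonneg]
    rw [hs1, hs2, List.foldl_append,
        pv_midfold al (al.length - 3) (by omega)]
    have hs0 : pvStepA al
        ([PySem.Str.join "" ((al.drop 1).take (al.length - 3)) ++ "",
          PySem.List.pyGetD al ((al.length : Int) - 2) "",
          PySem.List.pyGetD al ((al.length : Int) - 1) ""], 0) 0
        = ([PySem.List.pyGetD al 0 "" ++ " " ++
             (PySem.Str.join "" ((al.drop 1).take (al.length - 3)) ++ ""),
            PySem.List.pyGetD al ((al.length : Int) - 2) "",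
            PySem.List.pyGetD al ((al.length : Int) - 1) ""], 0) := by
      unfold pvStepA
      rw [if_neg (by omega), if_neg (by omega)]
      simp [PySem.List.pySetD_of_nonneg, PySem.List.pyGetD_zero_cons]
    rw [List.foldl_cons, hs0]
    have hslice : PySem.List.slice al (some 1) (some ((al.length : Int) - 2))
        = (al.drop 1).take (al.length - 3) := by
      have e3 : (al.length : Int) - 2 = ((al.length - 2 : Nat) : Int) := by omega
      have e4 : (1 : Int) = ((1 : Nat) : Int) := by norm_num
      rw [e3, e4, PySem.List.slice_natCast]
      congr 1
    simp only [List.foldl_nil]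
    have g1 : (3 : Int) ≤ (al.length : Int) := hn
    have g2 : (2 : Int) ≤ (al.length : Int) := by omega
    have g3 : (1 : Int) ≤ (al.length : Int) := by omega
    simp [hslice, g1, g2, g3]
  · -- length 0, 1, 2: closed small shapes
    rcases al with _ | ⟨a, _ | ⟨b, _ | ⟨c, t⟩⟩⟩
    · rfl
    · simp [syntax_parse, syntax_parse_alt, pvStepA, PySem.List.pyRange_neg_one_cons,
        PySem.List.pyRange_neg_one_eq_nil, PySem.List.pySetD_of_nonneg, PySem.List.pyGetD_zero_cons]
    · simp [syntax_parse, syntax_parse_alt, pvStepA, PySem.List.pyRange_neg_one_cons,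
        PySem.List.pyRange_neg_one_eq_nil, PySem.List.pySetD_of_nonneg, PySem.List.pyGetD_zero_cons]
    · simp at h3

-- ===== VERDICT (by name: the statement is the Claim_ definition above) =====
theorem syntax_parse_spec : Claim_equal_syntax_parse := by
  intro al _
  exact pv_main al
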